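-- pv_equiv track=rewrite | github.com/aTanguay/M8_KitCreator | m8_kitcreator/gui.py | _parse_dropped_files
-- ===== SOURCE A (Python) =====
-- def _parse_dropped_files(data):
--     """
--     Parse file paths from drag-and-drop event data.
--
--     tkinterdnd2 returns paths in various formats depending on the platform.
--     On macOS, it typically returns: {/path/to/file.wav} {/path/to/other.wav}
--     Each path is wrapped in curly braces to handle spaces in filenames.
--
--     Args:
--         data: Raw data from drop event
--
--     Returns:
--         List of file paths
--     """
--     files = []
--
--     # Handle different formats
--     if isinstance(data, (list, tuple)):
--         files = list(data)
--     else: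
--         # String format: paths wrapped in curly braces
--         data = str(data)
--
--         # Parse by extracting content between curly braces
--         current = []
--         in_braces = False
--
--         for char in data:
--             if char == '{':
--                 in_braces = True
--                 current = []  # Start new path
--             elif char == '}':
--                 in_braces = False
--                 if current:
--                     files.append(''.join(current))
--                     current = []
--             elif in_braces:
--                 current.append(char)
--             # Ignore characters outside braces (spaces between paths)
--
--     # Clean up paths (remove leading/trailing whitespace)
--     files = [f.strip() for f in files if f.strip()]
--
--     return files
-- ===== SOURCE B (Python) =====
-- def _parse_dropped_files(data):
--     """
--     Parse file paths from drag-and-drop event data.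
--
--     Split-based re-implementation: each chunk after a '{' contributes the text
--     before its first '}' (chunks whose opening brace is never closed before the
--     next '{' contain no '}' and are skipped, matching the reset-on-'{' behavior).
--     """
--     if isinstance(data, (list, tuple)):
--         files = list(data)
--     else:
--         files = [seg.partition('}')[0]
--                  for seg in str(data).split('{')[1:]
--                  if '}' in seg]
--     return [f.strip() for f in files if f.strip()]
-- ===== Notes on version B (the rewrite author's own statement) =====
-- stated objective: idiomatic
-- what changed: A's character-by-character state machine (in_braces flag + current buffer) is replaced by splitting on '{' and taking, from each chunk after an opening brace, the text before its first '}' (skipping chunks with no '}'), then the same strip-and-filter cleanup.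
import Mathlib
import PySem

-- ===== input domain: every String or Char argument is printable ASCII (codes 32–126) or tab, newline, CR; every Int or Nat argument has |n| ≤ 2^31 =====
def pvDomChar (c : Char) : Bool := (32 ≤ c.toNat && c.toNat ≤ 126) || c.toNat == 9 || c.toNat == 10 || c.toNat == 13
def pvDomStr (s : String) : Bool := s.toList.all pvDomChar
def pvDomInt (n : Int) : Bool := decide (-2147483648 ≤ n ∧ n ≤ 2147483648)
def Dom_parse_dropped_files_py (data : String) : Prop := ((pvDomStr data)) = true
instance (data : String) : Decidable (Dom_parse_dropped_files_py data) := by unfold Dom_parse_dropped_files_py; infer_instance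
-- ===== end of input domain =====

-- B replaces A's character-by-character brace state machine by a split-based
-- comprehension (idiomatic); equivalence is about the String input (the Python
-- list/tuple passthrough branch is outside this String-typed port).

-- ===== PORT A =====
-- the body of A's for-loop: state = (files, current, in_braces)
def pdfStepA (st : List (List Char) × List Char × Bool) (ch : Char) :
    List (List Char) × List Char × Bool :=
  if ch = '{' then (st.1, [], true)
  else if ch = '}' then
    (if st.2.1 ≠ [] then (st.1 ++ [st.2.1], [], false) else (st.1, st.2.1, false))
  else if st.2.2 then (st.1, st.2.1 ++ [ch], true)
  else st

def parse_dropped_files_py (data : String) : List String :=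
  let files := (data.toList.foldl pdfStepA ([], [], false)).1
  -- files = [f.strip() for f in files if f.strip()]
  (files.filter (fun f => PySem.Chars.strip f ≠ [])).map
    (fun f => String.mk (PySem.Chars.strip f))

-- ===== PORT B =====
def parse_dropped_files_py_alt (data : String) : List String :=
  -- str(data).split('{')[1:]
  let segs := (PySem.Chars.splitOn data.toList ['{']).drop 1
  -- [seg.partition('}')[0] for seg in segs if '}' in seg]
  -- seg.partition('}')[0] for the one-char separator '}' is exactly the prefix
  -- of seg before its first '}' (the whole seg if '}' is absent): takeWhile (· ≠ '}')
  let files := (segs.filter (fun seg => PySem.Chars.isIn ['}'] seg)).map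
    (fun seg => seg.takeWhile (fun ch => ch ≠ '}'))
  -- [f.strip() for f in files if f.strip()]
  (files.filter (fun f => PySem.Chars.strip f ≠ [])).map
    (fun f => String.mk (PySem.Chars.strip f))

-- ===== PRECONDITION & SPEC =====
def Spec_parse_dropped_files_py (data : String) (out : List String) : Prop := out = parse_dropped_files_py_alt data
instance (data : String) (out : List String) : Decidable (Spec_parse_dropped_files_py data out) := by unfold Spec_parse_dropped_files_py; infer_instance

-- ===== CLAIM (what is proved, stated in full; the proofs are below) =====
def Claim_equal_parse_dropped_files_py : Prop := ∀ (data : String), Dom_parse_dropped_files_py data → Spec_parse_dropped_files_py data (parse_dropped_files_py data)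

-- ===== LEMMAS AND PROOFS =====

-- structural form of `s.split('{')` (one-character separator '{')
def pdfAux : List Char → List (List Char)
  | [] => [[]]
  | a :: t => if a = '{' then [] :: pdfAux t else (pdfAux t).modifyHead (a :: ·)

lemma pdfAux_ne_nil (l : List Char) : pdfAux l ≠ [] := by
  induction l with
  | nil => simp [pdfAux]
  | cons a t ih =>
    simp only [pdfAux]
    split_ifs
    · simp
    · cases h : pdfAux t with
      | nil => exact absurd h ih
      | cons p ps => simp [List.modifyHead]

lemma pdf_modifyHead_id (l : List (List Char)) : l.modifyHead (fun x => x) = l := by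
  cases l <;> simp [List.modifyHead]

lemma pdf_splitOn_go (l : List Char) :
    ∀ (fuel : Nat) (cur : List Char) (acc : List (List Char)), l.length ≤ fuel →
      PySem.Chars.splitOn.go ['{'] fuel l cur acc =
        acc.reverse ++ (pdfAux l).modifyHead (cur.reverse ++ ·) := by
  induction l with
  | nil =>
    intro fuel cur acc _
    cases fuel <;> simp [PySem.Chars.splitOn.go, pdfAux, List.modifyHead]
  | cons ch rest ih =>
    intro fuel cur acc hf
    cases fuel with
    | zero => simp at hf
    | succ f =>
      by_cases hc : ch = '{'
      · subst hc
        rw [show PySem.Chars.splitOn.go ['{'] (f+1) ('{' :: rest) cur acc =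
              PySem.Chars.splitOn.go ['{'] f rest [] (cur.reverse :: acc) by
            simp [PySem.Chars.splitOn.go, List.isPrefixOf]]
        rw [ih f [] (cur.reverse :: acc) (by simpa using hf)]
        have haux : pdfAux ('{' :: rest) = [] :: pdfAux rest := by simp [pdfAux]
        rw [haux]
        cases pdfAux rest <;> simp [List.modifyHead]
      · have hpre : (['{'].isPrefixOf (ch :: rest)) = false := by
          simp [List.isPrefixOf, Ne.symm hc]
        rw [show PySem.Chars.splitOn.go ['{'] (f+1) (ch :: rest) cur acc =
              PySem.Chars.splitOn.go ['{'] f rest (ch :: cur) acc by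
            simp [PySem.Chars.splitOn.go, hpre]]
        rw [ih f (ch :: cur) acc (by simpa using Nat.lt_succ_iff.mp (by simpa using hf))]
        simp only [pdfAux, if_neg hc]
        cases h : pdfAux rest with
        | nil => exact absurd h (pdfAux_ne_nil rest)
        | cons p ps => simp [List.modifyHead]

lemma pdf_splitOn (l : List Char) : PySem.Chars.splitOn l ['{'] = pdfAux l := by
  rw [PySem.Chars.splitOn, pdf_splitOn_go l (l.length + 1) [] [] (Nat.le_succ _)]
  simp [pdf_modifyHead_id]

-- candidate contributed by a single in-braces run with already-read content cur
def pdfCapt (cur h : List Char) : List (List Char) :=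
  if '}' ∈ h ∧ cur ++ h.takeWhile (fun ch => ch ≠ '}') ≠ [] then
    [cur ++ h.takeWhile (fun ch => ch ≠ '}')] else []

-- B's nonempty candidates for a list of pieces
def pdfG (pieces : List (List Char)) : List (List Char) :=
  ((pieces.filter (fun seg => decide ('}' ∈ seg))).map
    (fun seg => seg.takeWhile (fun ch => ch ≠ '}'))).filter (· ≠ [])

lemma pdfG_cons (p : List Char) (ps : List (List Char)) :
    pdfG (p :: ps) = pdfCapt [] p ++ pdfG ps := by
  by_cases h : '}' ∈ p
  · by_cases he : p.takeWhile (fun ch => ch ≠ '}') = []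
    · have hc : pdfCapt [] p = [] := by
        rw [pdfCapt, if_neg]; rintro ⟨-, hne⟩; exact hne (by simpa using he)
      rw [hc]
      have he' : List.takeWhile (fun ch => !decide (ch = '}')) p = [] := by simpa using he
      simp [pdfG, h, he']
    · have hc : pdfCapt [] p = [p.takeWhile (fun ch => ch ≠ '}')] := by
        rw [pdfCapt, if_pos ⟨h, by simpa using he⟩]; simp
      rw [hc]
      have he' : ¬ List.takeWhile (fun ch => !decide (ch = '}')) p = [] := by simpa using he
      simp [pdfG, h, he']
  · have hc : pdfCapt [] p = [] := by
      rw [pdfCapt, if_neg]; rintro ⟨hh, -⟩; exact h hh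
    rw [hc]
    simp [pdfG, h]

lemma pdfMain (l : List Char) : ∀ fs : List (List Char),
    ((l.foldl pdfStepA (fs, [], false)).1 = fs ++ pdfG ((pdfAux l).drop 1)) ∧
    (∀ cur : List Char, '{' ∉ cur → '}' ∉ cur →
      (l.foldl pdfStepA (fs, cur, true)).1 =
        fs ++ pdfCapt cur (pdfAux l).headI ++ pdfG (pdfAux l).tail) := by
  induction l with
  | nil =>
    intro fs
    refine ⟨by simp [pdfG, pdfAux], ?_⟩
    intro cur _ _
    simp [pdfAux, pdfCapt, pdfG]
  | cons a t ih =>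
    intro fs
    obtain ⟨p, ps, hpt⟩ : ∃ p ps, pdfAux t = p :: ps := by
      cases h : pdfAux t with
      | nil => exact absurd h (pdfAux_ne_nil t)
      | cons p ps => exact ⟨p, ps, rfl⟩
    constructor
    · -- out-of-braces mode, current = []
      by_cases ha : a = '{'
      · subst ha
        have h2 := (ih fs).2 [] (by simp) (by simp)
        have hstep : pdfStepA (fs, [], false) '{' = (fs, [], true) := by simp [pdfStepA]
        simp only [List.foldl_cons, hstep]
        rw [h2]
        simp [pdfAux, hpt, pdfG_cons]
      · have h1 := (ih fs).1
        have hstep : pdfStepA (fs, [], false) a = (fs, [], false) := by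
          by_cases hb : a = '}' <;> simp [pdfStepA, ha, hb]
        simp only [List.foldl_cons, hstep]
        rw [h1]
        simp [pdfAux, ha, hpt, List.modifyHead]
    · -- in-braces mode
      intro cur hco hcc
      by_cases ha : a = '{'
      · subst ha
        have h2 := (ih fs).2 [] (by simp) (by simp)
        have hstep : pdfStepA (fs, cur, true) '{' = (fs, [], true) := by simp [pdfStepA]
        simp only [List.foldl_cons, hstep]
        rw [h2]
        simp [pdfAux, hpt, pdfG_cons, pdfCapt]
      · by_cases hb : a = '}'
        · subst hb
          have hstep : pdfStepA (fs, cur, true) '}' =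
              (fs ++ (if cur ≠ [] then [cur] else []), [], false) := by
            by_cases he : cur = [] <;> simp [pdfStepA, he]
          have h1 := (ih (fs ++ (if cur ≠ [] then [cur] else []))).1
          simp only [List.foldl_cons, hstep]
          rw [h1]
          have hcap : pdfCapt cur (pdfAux ('}' :: t)).headI = if cur ≠ [] then [cur] else [] := by
            simp only [pdfAux, if_neg (by decide : ¬ ('}' : Char) = '{'), hpt, List.modifyHead,
              List.headI, pdfCapt]
            by_cases he : cur = [] <;> simp [he, List.takeWhile]
          rw [hcap]
          simp [pdfAux, hpt, List.modifyHead]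
        · have hstep : pdfStepA (fs, cur, true) a = (fs, cur ++ [a], true) := by
            simp [pdfStepA, ha, hb]
          have h2 := (ih fs).2 (cur ++ [a])
            (by simp; exact ⟨hco, fun e => ha e.symm⟩)
            (by simp; exact ⟨hcc, fun e => hb e.symm⟩)
          simp only [List.foldl_cons, hstep]
          rw [h2]
          have hcap : pdfCapt (cur ++ [a]) (pdfAux t).headI =
              pdfCapt cur (pdfAux (a :: t)).headI := by
            simp only [pdfAux, if_neg ha, hpt, List.modifyHead, List.headI, pdfCapt]
            have hb' : ¬('}' = a) := fun e => hb e.symm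
            simp [List.takeWhile, hb, hb', List.append_assoc]
          rw [hcap]
          simp [pdfAux, ha, hpt, List.modifyHead]

lemma pdf_isIn_singleton (c : Char) (s : List Char) :
    PySem.Chars.isIn [c] s = decide (c ∈ s) := by
  by_cases h : c ∈ s
  · simp only [h, decide_true]
    rw [PySem.Chars.isIn_iff_infix]
    exact (List.singleton_infix_iff c s).mpr h
  · simp only [h, decide_false]
    rw [PySem.Chars.isIn_eq_false_iff]
    exact fun hinf => h ((List.singleton_infix_iff c s).mp hinf)

lemma pdf_filter_strip (Y : List (List Char)) :
    (Y.filter (fun x => x ≠ [])).filter (fun f => PySem.Chars.strip f ≠ []) =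
    Y.filter (fun f => PySem.Chars.strip f ≠ []) := by
  rw [List.filter_filter]
  apply List.filter_congr
  intro f _
  by_cases h : f = []
  · subst h
    simp [PySem.Chars.strip, PySem.Chars.lstrip, PySem.Chars.rstrip]
  · simp [h]

-- ===== VERDICT (by name: the statement is the Claim_ definition above) =====
theorem parse_dropped_files_py_spec : Claim_equal_parse_dropped_files_py := by
  intro data _
  unfold Spec_parse_dropped_files_py
  simp only [parse_dropped_files_py, parse_dropped_files_py_alt]
  rw [pdf_splitOn]
  have hfold := (pdfMain data.toList []).1
  simp only [List.nil_append] at hfold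
  rw [hfold]
  have hfilt : ((pdfAux data.toList).drop 1).filter (fun seg => PySem.Chars.isIn ['}'] seg)
      = ((pdfAux data.toList).drop 1).filter (fun seg => decide ('}' ∈ seg)) := by
    apply List.filter_congr
    intro seg _
    rw [pdf_isIn_singleton]
  rw [hfilt]
  simp only [pdfG]
  rw [pdf_filter_strip]
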